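-- pv_equiv track=rewrite | github.com/sense360store/WebFlash | scripts/gen-manifests.py | _normalise_config_tokens
-- ===== SOURCE A (Python) =====
-- from typing import Dict, List, Optional, Sequence, Tuple
--
-- CONFIG_CHIP_HINTS = {
--     "esp32": "ESP32",
--     "esp32c3": "ESP32-C3",
--     "esp32s3": "ESP32-S3",
-- }
--
-- def _normalise_config_tokens(tokens: List[str]) -> Tuple[List[str], Optional[str]]:
--     filtered: List[str] = []
--     chip_hint: Optional[str] = None
--     for token in tokens:
--         lowered = token.lower()
--         if lowered == "none":
--             continue
--         if lowered in CONFIG_CHIP_HINTS: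
--             chip_hint = CONFIG_CHIP_HINTS[lowered]
--             continue
--         filtered.append(token)
--     return filtered, chip_hint
-- ===== SOURCE B (Python) =====
-- from typing import Dict, List, Optional, Sequence, Tuple
--
-- CONFIG_CHIP_HINTS = {
--     "esp32": "ESP32",
--     "esp32c3": "ESP32-C3",
--     "esp32s3": "ESP32-S3",
-- }
--
-- def _normalise_config_tokens(tokens: List[str]) -> Tuple[List[str], Optional[str]]:
--     filtered = [t for t in tokens
--                 if t.lower() != "none" and t.lower() not in CONFIG_CHIP_HINTS]
--     chip_hint = None
--     for t in reversed(tokens):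
--         hint = CONFIG_CHIP_HINTS.get(t.lower())
--         if hint is not None:
--             chip_hint = hint
--             break
--     return filtered, chip_hint
-- ===== Notes on version B (the rewrite author's own statement) =====
-- stated objective: simpler
-- what changed: Replaces the single fused loop carrying two pieces of state with two independent passes: a list comprehension for the filtered tokens and a reversed scan with early exit that finds the last chip match.
import Mathlib
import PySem

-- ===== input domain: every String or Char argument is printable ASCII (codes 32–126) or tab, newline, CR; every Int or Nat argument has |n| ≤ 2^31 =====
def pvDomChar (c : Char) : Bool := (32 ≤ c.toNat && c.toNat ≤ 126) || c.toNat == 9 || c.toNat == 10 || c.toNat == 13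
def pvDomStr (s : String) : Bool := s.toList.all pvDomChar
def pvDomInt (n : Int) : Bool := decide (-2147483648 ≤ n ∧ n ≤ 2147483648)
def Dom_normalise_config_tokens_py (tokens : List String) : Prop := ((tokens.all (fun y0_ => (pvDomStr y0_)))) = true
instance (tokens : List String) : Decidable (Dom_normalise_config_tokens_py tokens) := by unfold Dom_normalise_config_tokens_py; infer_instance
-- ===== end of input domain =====

-- B replaces A's single fused loop (two pieces of state) with two independent passes:
-- a filter for the kept tokens and a reversed early-exit scan for the last chip hint.

-- ===== PORT A =====
-- CONFIG_CHIP_HINTS as an insertion-ordered association list (PySem.Dict)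
def configChipHints : PySem.Dict String String :=
  PySem.Dict.ofList [("esp32", "ESP32"), ("esp32c3", "ESP32-C3"), ("esp32s3", "ESP32-S3")]

-- A's loop: one fold carrying (filtered, chip_hint)
def normalise_config_tokens_py (tokens : List String) : List String × Option String :=
  tokens.foldl
    (fun st token =>
      let lowered := PySem.Str.lower token
      if lowered = "none" then st
      else
        match PySem.Dict.get? configChipHints lowered with
        | some h => (st.1, some h)
        | none => (st.1 ++ [token], st.2))
    ([], none)

-- ===== PORT B =====
def normalise_config_tokens_py_alt (tokens : List String) : List String × Option String :=
  ( tokens.filter (fun t =>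
      !(PySem.Str.lower t == "none")
        && (PySem.Dict.get? configChipHints (PySem.Str.lower t)).isNone
    )
  , tokens.reverse.findSome? (fun t => PySem.Dict.get? configChipHints (PySem.Str.lower t)) )

-- ===== PRECONDITION & SPEC =====
def Spec_normalise_config_tokens_py (tokens : List String) (out : List String × Option String) : Prop := out = normalise_config_tokens_py_alt tokens
instance (tokens : List String) (out : List String × Option String) : Decidable (Spec_normalise_config_tokens_py tokens out) := by unfold Spec_normalise_config_tokens_py; infer_instance

-- ===== CLAIM (what is proved, stated in full; the proofs are below) =====
def Claim_equal_normalise_config_tokens_py : Prop := ∀ (tokens : List String), Dom_normalise_config_tokens_py tokens → Spec_normalise_config_tokens_py tokens (normalise_config_tokens_py tokens)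

-- ===== LEMMAS AND PROOFS =====

-- A's fold from an arbitrary accumulator, characterised by B's two passes.
theorem foldA_char (tokens : List String) (fil : List String) (ch : Option String) :
    tokens.foldl
      (fun st token =>
        let lowered := PySem.Str.lower token
        if lowered = "none" then st
        else
          match PySem.Dict.get? configChipHints lowered with
          | some h => (st.1, some h)
          | none => (st.1 ++ [token], st.2))
      (fil, ch)
    = ( fil ++ tokens.filter (fun t =>
          !(PySem.Str.lower t == "none")
            && (PySem.Dict.get? configChipHints (PySem.Str.lower t)).isNone)
      , (tokens.reverse.findSome? (fun t => PySem.Dict.get? configChipHints (PySem.Str.lower t))).or ch ) := by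
  induction tokens generalizing fil ch with
  | nil => simp
  | cons t ts ih =>
      simp only [List.foldl_cons, List.reverse_cons, List.findSome?_append,
        List.findSome?_cons, List.findSome?_nil, List.filter_cons]
      by_cases hnone : PySem.Str.lower t = "none"
      · have hget : PySem.Dict.get? configChipHints "none" = none := by decide
        simp [hnone, hget, ih]
      · cases PySem.Dict.get? configChipHints (PySem.Str.lower t) <;> simp [hnone, ih]

-- ===== VERDICT (by name: the statement is the Claim_ definition above) =====
theorem normalise_config_tokens_py_spec : Claim_equal_normalise_config_tokens_py := by
  intro tokens _
  unfold Spec_normalise_config_tokens_py normalise_config_tokens_py normalise_config_tokens_py_alt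
  rw [foldA_char]
  cases tokens.reverse.findSome? (fun t => PySem.Dict.get? configChipHints (PySem.Str.lower t)) <;>
    simp [Option.or]
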